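-- pv_equiv track=rewrite | github.com/seaotterie/Grant_Automation | scripts/database/comprehensive_database_audit.py | categorize_missing_columns
-- ===== SOURCE A (Python) =====
-- from typing import Dict, List, Set
--
-- def categorize_missing_columns(missing: Set[str], form_type: str) -> Dict[str, List[str]]:
--     """Categorize missing columns by importance for grant research"""
--
--     # Critical keywords by form type
--     critical_keywords = {
--         '990': ['grant', 'revenue', 'asset', 'expense', 'compen', 'public'],
--         '990PF': ['adjnetinc', 'endwmnt', 'qlfyasset', 'progsrvc', 'excessrcpts', 'excptrans', 's4960', 'distribamt', 'contrpd'],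
--         '990EZ': ['revenue', 'asset', 'expense', 'support', 'grant'],
--         'BMF': ['ntee', 'classification', 'foundation', 'revenue', 'asset']
--     }
--
--     important_keywords = {
--         '990': ['compensation', 'investment', 'functional', 'netasset'],
--         '990PF': ['investment', 'qualifying', 'foundation', 'payout'],
--         '990EZ': ['contribution', 'netasset', 'public'],
--         'BMF': ['subsection', 'organization', 'status']
--     }
--
--     critical = []
--     important = []
--     minor = []
--
--     for col in sorted(missing):
--         col_lower = col.lower()
--
--         # Check critical
--         if any(keyword in col_lower for keyword in critical_keywords.get(form_type, [])):
--             critical.append(col.upper())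
--         # Check important
--         elif any(keyword in col_lower for keyword in important_keywords.get(form_type, [])):
--             important.append(col.upper())
--         else:
--             minor.append(col.upper())
--
--     return {
--         'critical': critical,
--         'important': important,
--         'minor': minor
--     }
-- ===== SOURCE B (Python) =====
-- def categorize_missing_columns(missing, form_type):
--     """Categorize missing columns by importance for grant research.
--
--     Keyword-driven: for each keyword list, drain the matching columns out of a
--     shrinking pool, then sort each bucket at the end (membership is
--     order-independent, so draining order does not matter)."""
--
--     critical_keywords = {
--         '990': ['grant', 'revenue', 'asset', 'expense', 'compen', 'public'],
--         '990PF': ['adjnetinc', 'endwmnt', 'qlfyasset', 'progsrvc', 'excessrcpts', 'excptrans', 's4960', 'distribamt', 'contrpd'],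
--         '990EZ': ['revenue', 'asset', 'expense', 'support', 'grant'],
--         'BMF': ['ntee', 'classification', 'foundation', 'revenue', 'asset']
--     }
--
--     important_keywords = {
--         '990': ['compensation', 'investment', 'functional', 'netasset'],
--         '990PF': ['investment', 'qualifying', 'foundation', 'payout'],
--         '990EZ': ['contribution', 'netasset', 'public'],
--         'BMF': ['subsection', 'organization', 'status']
--     }
--
--     def drain(pool, keywords):
--         taken = []
--         for kw in keywords:
--             taken += [c for c in pool if kw in c.lower()]
--             pool = [c for c in pool if kw not in c.lower()]
--         return taken, pool
--
--     pool = list(missing)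
--     crit, pool = drain(pool, critical_keywords.get(form_type, []))
--     imp, pool = drain(pool, important_keywords.get(form_type, []))
--
--     return {name: [c.upper() for c in sorted(bucket)]
--             for name, bucket in (('critical', crit), ('important', imp), ('minor', pool))}
-- ===== Notes on version B (the rewrite author's own statement) =====
-- stated objective: alternative
-- what changed: Inverted the traversal: instead of one priority elif-pass over the pre-sorted columns, B loops over the keyword lists, draining matching columns out of a shrinking unsorted pool (critical keywords first, then important; the leftover pool is minor), and sorts each bucket only at the end.
import Mathlib
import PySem

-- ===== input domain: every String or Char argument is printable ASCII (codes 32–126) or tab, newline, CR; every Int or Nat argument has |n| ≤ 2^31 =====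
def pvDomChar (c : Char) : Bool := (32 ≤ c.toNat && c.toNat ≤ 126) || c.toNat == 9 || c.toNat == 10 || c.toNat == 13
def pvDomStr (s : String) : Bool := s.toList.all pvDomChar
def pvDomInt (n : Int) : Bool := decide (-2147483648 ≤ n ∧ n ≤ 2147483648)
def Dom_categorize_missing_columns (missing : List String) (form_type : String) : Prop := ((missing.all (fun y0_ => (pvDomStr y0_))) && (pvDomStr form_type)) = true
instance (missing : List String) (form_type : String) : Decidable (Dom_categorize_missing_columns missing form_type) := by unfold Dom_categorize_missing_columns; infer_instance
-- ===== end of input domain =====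

-- B inverts A's traversal: keyword-outer drain loops over a shrinking unsorted pool,
-- buckets sorted at the end, instead of one priority elif-pass over pre-sorted columns
-- (objective: alternative; same result, similar cost).

-- ===== PORT A =====
-- the two keyword dicts, shared literals of both Pythons
def pvCriticalKeywords : PySem.Dict String (List String) :=
  PySem.Dict.ofList
    [("990", ["grant", "revenue", "asset", "expense", "compen", "public"]),
     ("990PF", ["adjnetinc", "endwmnt", "qlfyasset", "progsrvc", "excessrcpts", "excptrans", "s4960", "distribamt", "contrpd"]),
     ("990EZ", ["revenue", "asset", "expense", "support", "grant"]),
     ("BMF", ["ntee", "classification", "foundation", "revenue", "asset"])]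

def pvImportantKeywords : PySem.Dict String (List String) :=
  PySem.Dict.ofList
    [("990", ["compensation", "investment", "functional", "netasset"]),
     ("990PF", ["investment", "qualifying", "foundation", "payout"]),
     ("990EZ", ["contribution", "netasset", "public"]),
     ("BMF", ["subsection", "organization", "status"])]

-- any(keyword in col_lower for keyword in kws)
def pvMatchAny (col_lower : String) (kws : List String) : Bool :=
  kws.any (fun keyword => PySem.Str.isIn keyword col_lower)

def categorize_missing_columns (missing : List String) (form_type : String) : List (String × List String) :=
  let ck := PySem.Dict.getD pvCriticalKeywords form_type []
  let ik := PySem.Dict.getD pvImportantKeywords form_type []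
  let acc := (PySem.List.sorted missing (fun x => x) false).foldl
    (fun (acc : List String × List String × List String) col =>
      let col_lower := PySem.Str.lower col
      if pvMatchAny col_lower ck then (acc.1 ++ [PySem.Str.upper col], acc.2.1, acc.2.2)
      else if pvMatchAny col_lower ik then (acc.1, acc.2.1 ++ [PySem.Str.upper col], acc.2.2)
      else (acc.1, acc.2.1, acc.2.2 ++ [PySem.Str.upper col]))
    ([], [], [])
  [("critical", acc.1), ("important", acc.2.1), ("minor", acc.2.2)]

-- ===== PORT B =====
-- drain(pool, keywords): for kw in keywords, move the columns containing kw from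
-- the pool into 'taken'; returns (taken, remaining pool)
def pvDrain (pool : List String) (kws : List String) : List String × List String :=
  kws.foldl
    (fun (st : List String × List String) kw =>
      (st.1 ++ st.2.filter (fun c => PySem.Str.isIn kw (PySem.Str.lower c)),
       st.2.filter (fun c => !PySem.Str.isIn kw (PySem.Str.lower c))))
    ([], pool)

def categorize_missing_columns_alt (missing : List String) (form_type : String) : List (String × List String) :=
  let ck := PySem.Dict.getD pvCriticalKeywords form_type []
  let ik := PySem.Dict.getD pvImportantKeywords form_type []
  let d1 := pvDrain missing ck
  let d2 := pvDrain d1.2 ik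
  [("critical", (PySem.List.sorted d1.1 (fun x => x) false).map PySem.Str.upper),
   ("important", (PySem.List.sorted d2.1 (fun x => x) false).map PySem.Str.upper),
   ("minor", (PySem.List.sorted d2.2 (fun x => x) false).map PySem.Str.upper)]

-- ===== PRECONDITION & SPEC =====
def Spec_categorize_missing_columns (missing : List String) (form_type : String) (out : List (String × List String)) : Prop := out = categorize_missing_columns_alt missing form_type
instance (missing : List String) (form_type : String) (out : List (String × List String)) : Decidable (Spec_categorize_missing_columns missing form_type out) := by unfold Spec_categorize_missing_columns; infer_instance

-- ===== CLAIM (what is proved, stated in full; the proofs are below) =====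
def Claim_equal_categorize_missing_columns : Prop := ∀ (missing : List String) (form_type : String), Dom_categorize_missing_columns missing form_type → Spec_categorize_missing_columns missing form_type (categorize_missing_columns missing form_type)

-- ===== LEMMAS AND PROOFS =====

-- split-filter permutation: the matches of p followed by the p-misses matching q
-- are a rearrangement of the matches of (p or q)
theorem pv_filter_or_perm {α : Type} (p q : α → Bool) (l : List α) :
    (l.filter p ++ l.filter (fun c => !p c && q c)).Perm
      (l.filter (fun c => p c || q c)) := by
  induction l with
  | nil => simp
  | cons x xs ih =>
    by_cases hp : p x
    · simpa [hp] using ih.cons x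
    · by_cases hq : q x
      · simp only [List.filter_cons, hp, hq]
        simpa [hp, hq] using (List.perm_middle.trans (ih.cons x))
      · simpa [hp, hq] using ih

-- the drain loop: the leftover pool is the no-keyword-matches filter, and the taken
-- list is a rearrangement of the some-keyword-matches filter
theorem pv_drain_spec (kws pool acc : List String) :
    (kws.foldl
      (fun (st : List String × List String) kw =>
        (st.1 ++ st.2.filter (fun c => PySem.Str.isIn kw (PySem.Str.lower c)),
         st.2.filter (fun c => !PySem.Str.isIn kw (PySem.Str.lower c))))
      (acc, pool)).2
      = pool.filter (fun c => !pvMatchAny (PySem.Str.lower c) kws)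
    ∧ (kws.foldl
      (fun (st : List String × List String) kw =>
        (st.1 ++ st.2.filter (fun c => PySem.Str.isIn kw (PySem.Str.lower c)),
         st.2.filter (fun c => !PySem.Str.isIn kw (PySem.Str.lower c))))
      (acc, pool)).1.Perm
      (acc ++ pool.filter (fun c => pvMatchAny (PySem.Str.lower c) kws)) := by
  induction kws generalizing pool acc with
  | nil => simp [pvMatchAny]
  | cons k ks ih =>
    obtain ⟨ih2, ih1⟩ := ih (pool.filter (fun c => !PySem.Str.isIn k (PySem.Str.lower c)))
      (acc ++ pool.filter (fun c => PySem.Str.isIn k (PySem.Str.lower c)))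
    constructor
    · rw [List.foldl_cons, ih2, List.filter_filter]
      exact List.filter_congr (fun c _ => by
        simp only [pvMatchAny, List.any_cons, Bool.not_or, Bool.and_comm])
    · rw [List.foldl_cons]
      refine ih1.trans ?_
      rw [List.filter_filter, List.append_assoc]
      refine List.Perm.append_left acc ?_
      have hcongr1 : pool.filter (fun a => pvMatchAny (PySem.Str.lower a) ks && !PySem.Str.isIn k (PySem.Str.lower a))
          = pool.filter (fun a => !PySem.Str.isIn k (PySem.Str.lower a) && pvMatchAny (PySem.Str.lower a) ks) :=
        List.filter_congr (fun c _ => Bool.and_comm _ _)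
      have hcongr2 : pool.filter (fun a => PySem.Str.isIn k (PySem.Str.lower a) || pvMatchAny (PySem.Str.lower a) ks)
          = pool.filter (fun c => pvMatchAny (PySem.Str.lower c) (k :: ks)) :=
        List.filter_congr (fun c _ => by simp only [pvMatchAny, List.any_cons])
      rw [hcongr1, ← hcongr2]
      exact pv_filter_or_perm _ _ pool

-- the same, for pvDrain itself (taken starts empty)
theorem pv_drain_spec' (kws pool : List String) :
    (pvDrain pool kws).2 = pool.filter (fun c => !pvMatchAny (PySem.Str.lower c) kws)
    ∧ (pvDrain pool kws).1.Perm (pool.filter (fun c => pvMatchAny (PySem.Str.lower c) kws)) := by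
  unfold pvDrain
  obtain ⟨h2, h1⟩ := pv_drain_spec kws pool []
  exact ⟨h2, by simpa using h1⟩

-- filtering the sorted list IS sorting the filtered list (identity key)
theorem pv_sorted_filter (p : String → Bool) (l : List String) :
    PySem.List.sorted (l.filter p) (fun x => x) false
      = (PySem.List.sorted l (fun x => x) false).filter p := by
  refine PySem.List.sorted_id_eq_of_perm_of_pairwise (l.filter p)
    ((PySem.List.sorted l (fun x => x) false).filter p) ?_ ?_
  · exact (PySem.List.sorted_perm l (fun x => x) false).filter p
  · exact (PySem.List.sorted_pairwise l (fun x => x)).filter p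

-- the elif-loop with triple accumulator equals the three filters, for any initial accumulator
theorem pv_fold_eq_filters (p q : String → Bool) (l : List String)
    (a b m : List String) :
    l.foldl
      (fun (acc : List String × List String × List String) col =>
        if p col then (acc.1 ++ [PySem.Str.upper col], acc.2.1, acc.2.2)
        else if q col then (acc.1, acc.2.1 ++ [PySem.Str.upper col], acc.2.2)
        else (acc.1, acc.2.1, acc.2.2 ++ [PySem.Str.upper col]))
      (a, b, m)
    = (a ++ (l.filter p).map PySem.Str.upper,
       b ++ (l.filter (fun c => !p c && q c)).map PySem.Str.upper,
       m ++ (l.filter (fun c => !p c && !q c)).map PySem.Str.upper) := by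
  induction l generalizing a b m with
  | nil => simp
  | cons x xs ih =>
    by_cases hp : p x <;> by_cases hq : q x <;>
      simp [List.foldl_cons, hp, hq, ih]

-- sorted of a bucket produced by draining = filter of the sorted input
theorem pv_sorted_of_perm_filter (p : String → Bool) (l b : List String)
    (h : b.Perm (l.filter p)) :
    PySem.List.sorted b (fun x => x) false
      = (PySem.List.sorted l (fun x => x) false).filter p := by
  rw [← pv_sorted_filter]
  exact PySem.List.sorted_eq_sorted_of_perm b (l.filter p) (fun x => x)
    (fun _ _ h => h) h

-- ===== VERDICT (by name: the statement is the Claim_ definition above) =====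
theorem categorize_missing_columns_spec : Claim_equal_categorize_missing_columns := by
  intro missing form_type _
  unfold Spec_categorize_missing_columns categorize_missing_columns categorize_missing_columns_alt
  dsimp only
  set ck := PySem.Dict.getD pvCriticalKeywords form_type []
  set ik := PySem.Dict.getD pvImportantKeywords form_type []
  obtain ⟨hc2, hc1⟩ := pv_drain_spec' ck missing
  obtain ⟨hi2, hi1⟩ := pv_drain_spec' ik (pvDrain missing ck).2
  rw [pv_fold_eq_filters (fun col => pvMatchAny (PySem.Str.lower col) ck)
    (fun col => pvMatchAny (PySem.Str.lower col) ik)]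
  simp only [List.nil_append]
  rw [hc2] at hi1 hi2
  have e1 := pv_sorted_of_perm_filter (fun c => pvMatchAny (PySem.Str.lower c) ck) missing _ hc1
  have e2 := pv_sorted_of_perm_filter
    (fun c => !pvMatchAny (PySem.Str.lower c) ck && pvMatchAny (PySem.Str.lower c) ik) missing _
    (hi1.trans (List.Perm.of_eq (by
      rw [List.filter_filter]
      exact List.filter_congr (fun c _ => Bool.and_comm _ _))))
  have e3 : (pvDrain (missing.filter (fun c => !pvMatchAny (PySem.Str.lower c) ck)) ik).2
      = missing.filter (fun c => !pvMatchAny (PySem.Str.lower c) ck && !pvMatchAny (PySem.Str.lower c) ik) := by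
    rw [hi2, List.filter_filter]
    exact List.filter_congr (fun c _ => Bool.and_comm _ _)
  rw [e1, hc2, e2, e3, pv_sorted_filter]
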